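-- pv_equiv track=rewrite | github.com/gregoryann/Python-Beginner-Examples | +1500 Python Challenges/Easy/Amplify the Multiples of Four.py | amplify
-- ===== SOURCE A (Python) =====
-- def amplify(num):
-- 	lst = []
-- 	for n in range(1,num+1):
-- 		if n % 4 == 0:
-- 			lst.append(n*10)
-- 		else:
-- 			lst.append(n)
-- 	return lst
-- ===== SOURCE B (Python) =====
-- def amplify(num):
-- 	# Walk in blocks of four: the first three entries unchanged, the fourth multiplied
-- 	# by 10, then one final extend for the leftover tail -- no per-element test.
-- 	out = []
-- 	k = 0
-- 	while k + 4 <= num: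
-- 		out.extend((k + 1, k + 2, k + 3, (k + 4) * 10))
-- 		k += 4
-- 	out.extend(range(k + 1, num + 1))
-- 	return out
-- ===== Notes on version B (the rewrite author's own statement) =====
-- stated objective: alternative
-- what changed: Replaces the single loop with a per-element % 4 test by block-of-four iteration that appends three unchanged values and one amplified value per step, plus a final range-extend for the tail, so no modulus test is performed.
import Mathlib
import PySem

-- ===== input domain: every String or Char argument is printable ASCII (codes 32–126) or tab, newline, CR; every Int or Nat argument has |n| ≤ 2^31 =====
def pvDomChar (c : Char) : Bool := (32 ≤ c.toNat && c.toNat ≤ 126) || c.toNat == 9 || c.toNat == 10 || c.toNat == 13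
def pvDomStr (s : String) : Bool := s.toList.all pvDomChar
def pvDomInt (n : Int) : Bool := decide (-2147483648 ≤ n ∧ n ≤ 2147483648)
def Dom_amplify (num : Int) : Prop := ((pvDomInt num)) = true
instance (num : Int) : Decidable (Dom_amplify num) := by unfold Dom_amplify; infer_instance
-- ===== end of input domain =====

-- B replaces the per-element `n % 4 == 0` test with block-of-four iteration
-- (three plain entries + one amplified entry per block, then a range tail): alternative decomposition.


-- ===== PORT A =====
def amplify (num : Int) : List Int :=
  (PySem.List.pyRange 1 (num + 1) 1).foldl
    (fun lst n => if PySem.Int.mod n 4 = 0 then lst ++ [n * 10] else lst ++ [n]) []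

-- ===== PORT B =====
-- the while-loop of Source B: k advances by 4 while k+4 ≤ num, then the range tail is appended
def amplifyBlocks (num k : Int) (out : List Int) : List Int :=
  if k + 4 ≤ num then
    amplifyBlocks num (k + 4) (out ++ [k + 1, k + 2, k + 3, (k + 4) * 10])
  else
    out ++ PySem.List.pyRange (k + 1) (num + 1) 1
termination_by (num - k).toNat
decreasing_by omega

def amplify_alt (num : Int) : List Int := amplifyBlocks num 0 []

-- ===== PRECONDITION & SPEC =====
def Spec_amplify (num : Int) (out : List Int) : Prop := out = amplify_alt num
instance (num : Int) (out : List Int) : Decidable (Spec_amplify num out) := by unfold Spec_amplify; infer_instance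

-- ===== CLAIM (what is proved, stated in full; the proofs are below) =====
def Claim_equal_amplify : Prop := ∀ (num : Int), Dom_amplify num → Spec_amplify num (amplify num)

-- ===== LEMMAS AND PROOFS =====
def ampF (n : Int) : Int := if PySem.Int.mod n 4 = 0 then n * 10 else n

theorem amplify_foldl (xs : List Int) (acc : List Int) :
    xs.foldl (fun lst n => if PySem.Int.mod n 4 = 0 then lst ++ [n * 10] else lst ++ [n]) acc
      = acc ++ xs.map ampF := by
  induction xs generalizing acc with
  | nil => simp
  | cons x xs ih =>
    simp only [List.foldl_cons, List.map_cons, ih, ampF]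
    split <;> simp

theorem map_ampF_tail (num k : Int) (h4 : k % 4 = 0) (h : ¬ k + 4 ≤ num) :
    (PySem.List.pyRange (k + 1) (num + 1) 1).map ampF = PySem.List.pyRange (k + 1) (num + 1) 1 := by
  have hmem : ∀ x ∈ PySem.List.pyRange (k + 1) (num + 1) 1, ampF x = x := by
    intro x hx
    rw [PySem.List.mem_pyRange_one] at hx
    have hne : x % 4 ≠ 0 := by omega
    simp [ampF, hne]
  calc (PySem.List.pyRange (k + 1) (num + 1) 1).map ampF
      = (PySem.List.pyRange (k + 1) (num + 1) 1).map id := List.map_congr_left hmem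
    _ = _ := List.map_id _

theorem amplifyBlocks_eq (fuel : Nat) : ∀ (num k : Int) (out : List Int),
    (num - k).toNat ≤ fuel → k % 4 = 0 → 0 ≤ k →
    amplifyBlocks num k out = out ++ (PySem.List.pyRange (k + 1) (num + 1) 1).map ampF := by
  induction fuel with
  | zero =>
    intro num k out hle h4 h0
    have h : ¬ k + 4 ≤ num := by omega
    rw [amplifyBlocks, if_neg h, map_ampF_tail num k h4 h]
  | succ m ih =>
    intro num k out hle h4 h0
    rw [amplifyBlocks]
    split
    · rename_i h
      have hrec := ih num (k + 4) (out ++ [k + 1, k + 2, k + 3, (k + 4) * 10])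
        (by omega) (by omega) (by omega)
      rw [hrec]
      have hblock : PySem.List.pyRange (k + 1) (k + 4 + 1) 1 = [k + 1, k + 2, k + 3, k + 4] := by
        rw [PySem.List.pyRange_one_cons (by omega),
            PySem.List.pyRange_one_cons (by omega),
            PySem.List.pyRange_one_cons (by omega),
            PySem.List.pyRange_one_cons (by omega),
            PySem.List.pyRange_one_eq_nil (by omega)]
        norm_num
        omega
      rw [PySem.List.pyRange_one_append (k + 1) (k + 4 + 1) (num + 1) (by omega) (by omega),
          List.map_append, hblock]
      have h1 : (k + 1) % 4 ≠ 0 := by omega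
      have h2 : (k + 2) % 4 ≠ 0 := by omega
      have h3 : (k + 3) % 4 ≠ 0 := by omega
      have hk4 : (k + 4) % 4 = 0 := by omega
      simp [ampF, h1, h2, h3, hk4]
    · rename_i h
      rw [map_ampF_tail num k h4 h]

-- ===== VERDICT (by name: the statement is the Claim_ definition above) =====
theorem amplify_spec : Claim_equal_amplify := by
  intro num _
  unfold Spec_amplify amplify amplify_alt
  rw [amplify_foldl,
      amplifyBlocks_eq (num - 0).toNat num 0 [] (le_refl _) (by norm_num) (le_refl 0)]
  norm_num
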